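-- pv_equiv track=rewrite | github.com/ErManoj-Sharma/Practice_Programs | advent_of_code_2015/day 11/11.py | check_increment_str
-- ===== SOURCE A (Python) =====
-- def check_increment_str(s):
--     l = len(s)
--     flag = False
--     for i in range(0,l-2):
--         s1 = ord(s[i])
--         s2 = ord(s[i+1])
--         s3 = ord(s[i+2])
--         if s2-s1 == 1 and s3-s2 == 1 and s3-s1 == 2:
--             flag = True
--     return flag
-- ===== SOURCE B (Python) =====
-- def check_increment_str(s):
--     run = 1
--     flag = False
--     for i in range(1, len(s)):
--         if ord(s[i]) - ord(s[i - 1]) == 1: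
--             run += 1
--         else:
--             run = 1
--         if run >= 3:
--             flag = True
--     return flag
-- ===== Notes on version B (the rewrite author's own statement) =====
-- stated objective: alternative
-- what changed: Replaces the three-offset window re-read at every index by a single pass that maintains the current ascending-run length (counter reset on a break) and flags once the run reaches 3.
import Mathlib
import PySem

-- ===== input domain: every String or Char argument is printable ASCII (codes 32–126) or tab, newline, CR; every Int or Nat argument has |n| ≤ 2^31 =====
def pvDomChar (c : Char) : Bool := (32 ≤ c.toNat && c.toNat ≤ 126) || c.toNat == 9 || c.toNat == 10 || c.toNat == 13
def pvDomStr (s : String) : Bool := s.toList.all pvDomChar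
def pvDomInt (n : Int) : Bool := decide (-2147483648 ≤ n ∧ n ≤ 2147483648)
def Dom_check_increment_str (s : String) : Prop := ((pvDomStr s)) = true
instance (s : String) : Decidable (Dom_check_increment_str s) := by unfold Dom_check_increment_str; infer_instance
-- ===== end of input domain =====

-- B replaces A's three-offset window check at every index by a single pass maintaining the
-- current ascending-run length (reset on a break), flagging once the run reaches 3 (alternative; same cost).

-- ===== PORT A =====
-- literal port: loop over range(0, len(s)-2), read the three offsets, set flag on the window check
def check_increment_str (s : String) : Bool :=
  let cs := s.toList
  let l : Int := PySem.Str.len s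
  (PySem.List.pyRange 0 (l - 2) 1).foldl
    (fun flag i =>
      let s1 : Int := ((PySem.List.pyGetD cs i ' ').toNat : Int)
      let s2 : Int := ((PySem.List.pyGetD cs (i + 1) ' ').toNat : Int)
      let s3 : Int := ((PySem.List.pyGetD cs (i + 2) ' ').toNat : Int)
      if s2 - s1 == 1 && (s3 - s2 == 1 && s3 - s1 == 2) then true else flag)
    false

-- ===== PORT B =====
-- literal port of Source B: the loop over i in range(1, len(s)) carrying (prev char, run, flag)
def altGo (p : Char) (run : Int) (flag : Bool) : List Char → Bool
  | [] => flag
  | c :: rest =>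
      let run' : Int := if ((c.toNat : Int) - (p.toNat : Int)) == 1 then run + 1 else 1
      let flag' : Bool := if run' ≥ 3 then true else flag
      altGo c run' flag' rest

def check_increment_str_alt (s : String) : Bool :=
  match s.toList with
  | [] => false
  | c :: rest => altGo c 1 false rest

-- ===== PRECONDITION & SPEC =====
def Spec_check_increment_str (s : String) (out : Bool) : Prop := out = check_increment_str_alt s
instance (s : String) (out : Bool) : Decidable (Spec_check_increment_str s out) := by unfold Spec_check_increment_str; infer_instance

-- ===== CLAIM (what is proved, stated in full; the proofs are below) =====
def Claim_equal_check_increment_str : Prop := ∀ (s : String), Dom_check_increment_str s → Spec_check_increment_str s (check_increment_str s)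

-- ===== LEMMAS AND PROOFS =====

-- proof-side characterisation: "some three consecutive chars are ascending by 1"
def incB (a b : Char) : Bool := b.toNat == a.toNat + 1

def headInc (a : Char) : List Char → Bool
  | [] => false
  | c :: _ => incB a c

def tri : List Char → Bool
  | a :: b :: r => (incB a b && headInc b r) || tri (b :: r)
  | _ => false

-- A's window condition at Nat index k
def condN (cs : List Char) (k : Nat) : Bool :=
  (((cs.getD (k + 1) ' ').toNat : Int) - ((cs.getD k ' ').toNat : Int) == 1 &&
    (((cs.getD (k + 2) ' ').toNat : Int) - ((cs.getD (k + 1) ' ').toNat : Int) == 1 &&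
      ((cs.getD (k + 2) ' ').toNat : Int) - ((cs.getD k ' ').toNat : Int) == 2))

lemma condN_shift (a : Char) (t : List Char) (k : Nat) : condN (a :: t) (k + 1) = condN t k := by
  have h2 : k + 1 + 2 = (k + 2) + 1 := by omega
  unfold condN
  rw [h2]
  simp

lemma condN_zero (a b c : Char) (r : List Char) :
    condN (a :: b :: c :: r) 0 = (incB a b && incB b c) := by
  unfold condN incB
  simp only [List.getD_cons_zero, List.getD_cons_succ, zero_add]
  rw [Bool.eq_iff_iff]
  simp only [Bool.and_eq_true, beq_iff_eq]
  omega

lemma anyWin (cs : List Char) : (List.range (cs.length - 2)).any (condN cs) = tri cs := by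
  induction cs with
  | nil => simp [tri]
  | cons a t ih =>
    match t with
    | [] => simp [tri]
    | [b] => simp [tri, headInc]
    | b :: c :: r =>
      have hlen : (a :: b :: c :: r).length - 2 = r.length + 1 := by simp
      rw [hlen, List.range_succ_eq_map, List.any_cons, List.any_map]
      have hshift : ((List.range r.length).any (condN (a :: b :: c :: r) ∘ Nat.succ))
          = (List.range r.length).any (condN (b :: c :: r)) := by
        apply PySem.List.any_congr_mem
        intro k _
        exact condN_shift a (b :: c :: r) k
      have hlen' : (b :: c :: r).length - 2 = r.length := by simp
      rw [hshift, condN_zero]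
      have := ih
      rw [hlen'] at this
      rw [this]
      conv_rhs => rw [tri]
      simp [headInc]

lemma altGo_true (rest : List Char) (p : Char) (run : Int) :
    altGo p run true rest = true := by
  induction rest generalizing p run with
  | nil => simp [altGo]
  | cons c r ih =>
    simp only [altGo]
    split_ifs <;> exact ih ..

lemma altGo_flag (rest : List Char) (p : Char) (run : Int) (flag : Bool) :
    altGo p run flag rest = (flag || altGo p run false rest) := by
  cases flag
  · simp
  · simp [altGo_true]

lemma altGo_tri (rest : List Char) (p : Char) (run : Int) (h1 : 1 ≤ run) :
    altGo p run false rest = (tri (p :: rest) || (decide (2 ≤ run) && headInc p rest)) := by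
  induction rest generalizing p run with
  | nil => simp [altGo, tri, headInc]
  | cons c r ih =>
    simp only [altGo]
    by_cases hinc : ((c.toNat : Int) - (p.toNat : Int)) = 1
    · have hib : incB p c = true := by simp [incB]; omega
      rw [if_pos (by simpa using hinc)]
      rw [altGo_flag, ih c (run + 1) (by omega)]
      have hd3 : (decide (run + 1 ≥ 3) : Bool) = decide (2 ≤ run) := by
        by_cases h : 2 ≤ run <;> simp [h] <;> omega
      have hd2 : (decide (2 ≤ run + 1) : Bool) = true := by simp; omega
      rw [tri]
      simp only [hib, hd2, Bool.true_and]
      split_ifs with h3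
      · have : (decide (2 ≤ run) : Bool) = true := by simp; omega
        simp [this, headInc, hib]
      · have : (decide (2 ≤ run) : Bool) = false := by simp; omega
        simp [this, headInc]
        cases tri (c :: r) <;> cases headInc c r <;> simp
    · have hib : incB p c = false := by simp [incB]; omega
      rw [if_neg (by simpa using hinc)]
      rw [if_neg (by omega)]
      rw [ih c 1 (by omega)]
      conv_rhs => rw [tri]
      simp [hib, headInc]

lemma portA_eq_tri (s : String) : check_increment_str s = tri s.toList := by
  unfold check_increment_str
  rw [PySem.List.foldl_if_true_eq]
  simp only [Bool.false_or, PySem.Str.len_eq]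
  rw [PySem.List.pyRange_one]
  rw [List.any_map]
  have hcast : (((s.toList.length : Int) - 2) - 0).toNat = s.toList.length - 2 := by omega
  rw [hcast]
  have : ∀ k ∈ List.range (s.toList.length - 2),
      ((fun i =>
        let s1 : Int := ((PySem.List.pyGetD s.toList i ' ').toNat : Int)
        let s2 : Int := ((PySem.List.pyGetD s.toList (i + 1) ' ').toNat : Int)
        let s3 : Int := ((PySem.List.pyGetD s.toList (i + 2) ' ').toNat : Int)
        (s2 - s1 == 1 && (s3 - s2 == 1 && s3 - s1 == 2))) ∘ (fun k : Nat => (0 : Int) + k)) k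
      = condN s.toList k := by
    intro k _
    simp only [Function.comp, condN, zero_add]
    have h1 : (k : Int) + 1 = ((k + 1 : Nat) : Int) := by push_cast; ring
    have h2 : (k : Int) + 2 = ((k + 2 : Nat) : Int) := by push_cast; ring
    rw [h1, h2, PySem.List.pyGetD_natCast, PySem.List.pyGetD_natCast,
      PySem.List.pyGetD_natCast]
  rw [PySem.List.any_congr_mem this]
  exact anyWin s.toList

lemma portB_eq_tri (s : String) : check_increment_str_alt s = tri s.toList := by
  cases hcs : s.toList with
  | nil => simp [check_increment_str_alt, hcs, tri]
  | cons c rest =>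
    simp only [check_increment_str_alt, hcs]
    rw [altGo_tri rest c 1 (by omega)]
    simp

-- ===== VERDICT (by name: the statement is the Claim_ definition above) =====
theorem check_increment_str_spec : Claim_equal_check_increment_str := by
  intro s _
  unfold Spec_check_increment_str
  rw [portA_eq_tri, portB_eq_tri]
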